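-- pv_equiv track=rewrite | github.com/Axeldnahcram/FLER | FLER-core/FLER_core/prediction.py | presufixe
-- ===== SOURCE A (Python) =====
-- prefixe=['anti','co','dis','il','im','in','inter','ir','mis','over','out','post','pre','pro','sub','super','trans','under']
--
-- suffixe=['dom','ship','hood','ian','er','er','ism','en','less','ish','ful','al','ly','en','ness','ship','ity','ize','ly']
--
-- def presufixe (text):
--     presuf=[]
--     for x in text :
--         b=0
--         if len(x)>5 :
--             for j in range (0,6):
--                 if x[0:j] in prefixe :
--                     b=1
--
--             for j in range(0,5):
--                 if x[len(x)-j:len(x)] in suffixe :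
--                     b=1
--         presuf.append(b)
--     return presuf
-- ===== SOURCE B (Python) =====
-- prefixe=['anti','co','dis','il','im','in','inter','ir','mis','over','out','post','pre','pro','sub','super','trans','under']
--
-- suffixe=['dom','ship','hood','ian','er','er','ism','en','less','ish','ful','al','ly','en','ness','ship','ity','ize','ly']
--
-- def presufixe(text):
--     return [1 if len(x) > 5 and (any(x.startswith(p) for p in prefixe)
--                                  or any(x.endswith(s) for s in suffixe))
--             else 0
--             for x in text]
-- ===== Notes on version B (the rewrite author's own statement) =====
-- stated objective: idiomatic
-- what changed: Instead of enumerating candidate substring lengths (slices x[0:j] for j in 0..5 and x[len-j:] for j in 0..4) and testing list membership, B scans the pattern lists once with str.startswith/str.endswith in a single comprehension; this is exact because every prefix has length <= 5 and every suffix length <= 4.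
import Mathlib
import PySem

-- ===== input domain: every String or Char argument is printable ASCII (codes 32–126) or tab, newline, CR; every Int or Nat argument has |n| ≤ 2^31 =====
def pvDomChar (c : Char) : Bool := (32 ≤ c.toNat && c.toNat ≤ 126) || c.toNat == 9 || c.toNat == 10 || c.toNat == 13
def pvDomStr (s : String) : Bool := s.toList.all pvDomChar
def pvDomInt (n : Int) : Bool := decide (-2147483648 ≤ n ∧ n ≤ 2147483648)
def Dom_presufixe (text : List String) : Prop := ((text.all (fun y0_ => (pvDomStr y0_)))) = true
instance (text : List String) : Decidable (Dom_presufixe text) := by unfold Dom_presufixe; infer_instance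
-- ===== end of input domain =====

-- B replaces A's slice-length enumeration with a direct startswith/endswith scan of the pattern
-- lists (exact because every prefix has length ≤ 5 and every suffix length ≤ 4); objective: idiomatic.

-- module constants shared by both implementations
def pvPrefixe : List String :=
  ["anti","co","dis","il","im","in","inter","ir","mis","over","out","post","pre","pro","sub","super","trans","under"]

def pvSuffixe : List String :=
  ["dom","ship","hood","ian","er","er","ism","en","less","ish","ful","al","ly","en","ness","ship","ity","ize","ly"]

-- ===== PORT A =====
def presufixe (text : List String) : List Int :=
  text.foldl (fun presuf x =>
    let b : Int := 0
    let b : Int :=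
      if 5 < (PySem.Str.len x : Int) then
        let b := (PySem.List.pyRange 0 6 1).foldl
          (fun b j => if PySem.Str.slice x (some 0) (some j) ∈ pvPrefixe then 1 else b) b
        (PySem.List.pyRange 0 5 1).foldl
          (fun b j =>
            if PySem.Str.slice x (some ((PySem.Str.len x : Int) - j)) (some (PySem.Str.len x : Int)) ∈ pvSuffixe
            then 1 else b) b
      else b
    presuf ++ [b]) []

-- ===== PORT B =====
def presufixe_alt (text : List String) : List Int :=
  text.map (fun x =>
    if 5 < (PySem.Str.len x : Int) ∧
       (pvPrefixe.any (fun p => PySem.Str.startswith x p) ∨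
        pvSuffixe.any (fun s => PySem.Str.endswith x s))
    then 1 else 0)

-- ===== PRECONDITION & SPEC =====
def Spec_presufixe (text : List String) (out : List Int) : Prop := out = presufixe_alt text
instance (text : List String) (out : List Int) : Decidable (Spec_presufixe text out) := by unfold Spec_presufixe; infer_instance

-- ===== CLAIM (what is proved, stated in full; the proofs are below) =====
def Claim_equal_presufixe : Prop := ∀ (text : List String), Dom_presufixe text → Spec_presufixe text (presufixe text)

-- ===== LEMMAS AND PROOFS =====

-- the per-element computation of A
def pvFlagA (x : String) : Int :=
  let b : Int := 0
  let b : Int :=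
    if 5 < (PySem.Str.len x : Int) then
      let b := (PySem.List.pyRange 0 6 1).foldl
        (fun b j => if PySem.Str.slice x (some 0) (some j) ∈ pvPrefixe then 1 else b) b
      (PySem.List.pyRange 0 5 1).foldl
        (fun b j =>
          if PySem.Str.slice x (some ((PySem.Str.len x : Int) - j)) (some (PySem.Str.len x : Int)) ∈ pvSuffixe
          then 1 else b) b
    else b
  b

theorem presufixe_eq_map (text : List String) : presufixe text = text.map pvFlagA :=
  (PySem.List.foldl_append_singleton_eq_map (f := pvFlagA) (l := text) (acc := [])).trans
    (List.nil_append _)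

-- a fold that only ever sets the flag to 1 is an `any`
theorem flag_foldl {α : Type} (P : α → Prop) [DecidablePred P] (l : List α) (b : Int) :
    l.foldl (fun b j => if P j then 1 else b) b = if l.any (fun j => decide (P j)) then 1 else b := by
  induction l generalizing b with
  | nil => simp
  | cons y ys ih =>
    simp only [List.foldl_cons, List.any_cons, ih]
    by_cases h : P y <;> by_cases h2 : ys.any (fun j => decide (P j)) = true <;> simp [h, h2]

theorem slice_take (x : String) (j : Nat) :
    PySem.Str.slice x (some 0) (some (j : Int)) = String.ofList (x.toList.take j) := by
  apply String.toList_inj.mp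
  simp [PySem.List.slice_to_natCast]

theorem slice_drop (x : String) (j : Nat) (hj : j ≤ x.toList.length) :
    PySem.Str.slice x (some ((PySem.Str.len x : Int) - (j : Int))) (some (PySem.Str.len x : Int))
      = String.ofList (x.toList.drop (x.toList.length - j)) := by
  apply String.toList_inj.mp
  have h1 : ((PySem.Str.len x : Int) - (j : Int)) = ((x.toList.length - j : Nat) : Int) := by
    simp only [PySem.Str.len_eq]; omega
  have h2 : (PySem.Str.len x : Int) = ((x.toList.length - j : Nat) : Int) + (j : Nat) := by
    simp only [PySem.Str.len_eq]; omega
  rw [h1]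
  simp only [PySem.Str.toList_slice, PySem.Chars.slice_eq_listSlice, String.toList_ofList]
  rw [h2, PySem.List.slice_natCast_add]
  apply List.take_of_length_le
  simp only [List.length_drop]
  omega

theorem anyPrefix_eq (x : String) :
    ((PySem.List.pyRange 0 6 1).any
        (fun j => decide (PySem.Str.slice x (some 0) (some j) ∈ pvPrefixe)))
      = pvPrefixe.any (fun p => PySem.Str.startswith x p) := by
  rcases Bool.eq_false_or_eq_true (pvPrefixe.any (fun p => PySem.Str.startswith x p)) with h | h
  · rw [h]
    simp only [List.any_eq_true] at h ⊢
    obtain ⟨p, hp, hsw⟩ := h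
    rw [PySem.Str.startswith_eq, PySem.Chars.startswith_iff] at hsw
    refine ⟨(p.toList.length : Int), ?_, ?_⟩
    · rw [PySem.List.mem_pyRange_one]
      have : p.toList.length ≤ 5 := by
        fin_cases hp <;> decide
      omega
    · simp only [decide_eq_true_eq]
      rw [slice_take]
      have : x.toList.take p.toList.length = p.toList := (List.prefix_iff_eq_take.mp hsw).symm
      rw [this, String.ofList_toList]
      exact hp
  · rw [h]
    simp only [List.any_eq_false] at h ⊢
    intro j hj
    simp only [decide_eq_true_eq]
    intro hmem
    have hj' : 0 ≤ j := (PySem.List.mem_pyRange_one.mp hj).1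
    obtain ⟨k, rfl⟩ := Int.eq_ofNat_of_zero_le hj'
    rw [slice_take] at hmem
    exact h _ hmem (by
      rw [PySem.Str.startswith_eq, PySem.Chars.startswith_iff]
      rw [String.toList_ofList]
      exact List.take_prefix k x.toList)

theorem anySuffix_eq (x : String) (hx : 5 < x.toList.length) :
    ((PySem.List.pyRange 0 5 1).any
        (fun j => decide (PySem.Str.slice x (some ((PySem.Str.len x : Int) - j)) (some (PySem.Str.len x : Int)) ∈ pvSuffixe)))
      = pvSuffixe.any (fun s => PySem.Str.endswith x s) := by
  rcases Bool.eq_false_or_eq_true (pvSuffixe.any (fun s => PySem.Str.endswith x s)) with h | h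
  · rw [h]
    simp only [List.any_eq_true] at h ⊢
    obtain ⟨s, hs, hew⟩ := h
    rw [PySem.Str.endswith_eq, PySem.Chars.endswith_iff] at hew
    have hlen : s.toList.length ≤ 4 := by
      fin_cases hs <;> decide
    refine ⟨(s.toList.length : Int), ?_, ?_⟩
    · rw [PySem.List.mem_pyRange_one]; omega
    · simp only [decide_eq_true_eq]
      rw [slice_drop x s.toList.length (by omega)]
      have : x.toList.drop (x.toList.length - s.toList.length) = s.toList :=
        (List.suffix_iff_eq_drop.mp hew).symm
      rw [this, String.ofList_toList]
      exact hs
  · rw [h]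
    simp only [List.any_eq_false] at h ⊢
    intro j hj
    simp only [decide_eq_true_eq]
    intro hmem
    have hj' := PySem.List.mem_pyRange_one.mp hj
    obtain ⟨k, rfl⟩ := Int.eq_ofNat_of_zero_le hj'.1
    have hk : k ≤ x.toList.length := by omega
    rw [slice_drop x k hk] at hmem
    exact h _ hmem (by
      rw [PySem.Str.endswith_eq, PySem.Chars.endswith_iff]
      rw [String.toList_ofList]
      exact List.drop_suffix (x.toList.length - k) x.toList)

theorem flag_eq (x : String) :
    pvFlagA x = if 5 < (PySem.Str.len x : Int) ∧
       (pvPrefixe.any (fun p => PySem.Str.startswith x p) ∨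
        pvSuffixe.any (fun s => PySem.Str.endswith x s))
    then 1 else 0 := by
  unfold pvFlagA
  by_cases hlen : 5 < (PySem.Str.len x : Int)
  · have hx : 5 < x.toList.length := by simpa using hlen
    simp only [hlen, if_true]
    rw [flag_foldl (fun j => PySem.Str.slice x (some 0) (some j) ∈ pvPrefixe),
        flag_foldl (fun j => PySem.Str.slice x (some ((PySem.Str.len x : Int) - j)) (some (PySem.Str.len x : Int)) ∈ pvSuffixe),
        anyPrefix_eq, anySuffix_eq x hx]
    by_cases h1 : (pvPrefixe.any (fun p => PySem.Str.startswith x p)) = true <;>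
      by_cases h2 : (pvSuffixe.any (fun s => PySem.Str.endswith x s)) = true <;>
      simp only [List.any_eq_true, PySem.Str.startswith_eq, PySem.Str.endswith_eq] at h1 h2 <;>
      simp [h1, h2]
  · have hx : ¬ 5 < x.length := by simpa using hlen
    simp [hx]

-- ===== VERDICT (by name: the statement is the Claim_ definition above) =====
theorem presufixe_spec : Claim_equal_presufixe := by
  intro text _
  unfold Spec_presufixe presufixe_alt
  rw [presufixe_eq_map]
  exact List.map_congr_left (fun x _ => flag_eq x)
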